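-- pv_equiv track=rewrite | github.com/newbiecodeDCV/VietASR | api/api.py | _find_start_indices
-- ===== SOURCE A (Python) =====
-- from typing import Any, Dict, List, Optional, Tuple, Union
--
-- def _find_start_indices(main_list: List[str], sublist: List[str]) -> List[int]:
--     """Find all starting indices where sublist appears in main_list."""
--     start_indices = []
--     try:
--         index = main_list.index(sublist[0])
--         while index <= len(main_list) - len(sublist):
--             if main_list[index:index + len(sublist)] == sublist:
--                 start_indices.append(index)
--             index = main_list.index(sublist[0], index + 1)
--     except ValueError:
--         pass
--     return start_indices
-- ===== SOURCE B (Python) =====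
-- def _find_start_indices(main_list, sublist):
--     """Find all starting indices where sublist appears in main_list."""
--     k = len(sublist)
--     return [i for i in range(len(main_list) - k + 1) if main_list[i:i + k] == sublist]
-- ===== Notes on version B (the rewrite author's own statement) =====
-- stated objective: idiomatic
-- what changed: A hops between occurrences of sublist[0] via repeated list.index calls driven by a try/except ValueError loop; B is a single comprehension over all candidate start positions with a slice comparison, with no exception-based control flow.
-- crash fix: On an empty sublist A raises IndexError (sublist[0]); B returns every index 0..len(main_list), the natural 'empty pattern matches everywhere' answer. — e.g. on _find_start_indices(["a"], []): A raises IndexError, B returns [0, 1]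
import Mathlib
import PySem

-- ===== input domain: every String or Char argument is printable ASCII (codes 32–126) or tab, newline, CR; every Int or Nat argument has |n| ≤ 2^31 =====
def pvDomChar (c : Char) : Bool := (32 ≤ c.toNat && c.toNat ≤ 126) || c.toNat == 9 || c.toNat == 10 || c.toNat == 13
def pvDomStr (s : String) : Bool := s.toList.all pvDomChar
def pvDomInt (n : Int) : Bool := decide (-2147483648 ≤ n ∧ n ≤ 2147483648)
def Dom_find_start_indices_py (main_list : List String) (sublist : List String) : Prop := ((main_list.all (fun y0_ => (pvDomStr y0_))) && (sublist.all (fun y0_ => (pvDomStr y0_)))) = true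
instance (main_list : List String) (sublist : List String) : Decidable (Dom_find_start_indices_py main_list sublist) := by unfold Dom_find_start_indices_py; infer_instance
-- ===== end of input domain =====

-- B replaces A's exception-driven list.index hopping loop with one comprehension over all
-- candidate start positions (objective: idiomatic; same asymptotic cost).

-- ===== PORT A =====
-- main_list.index(v, start): first index ≥ start holding v; exact for the Nat starts A uses
def pvAFindFrom (xs : List String) (v : String) (start : Nat) : Option Nat :=
  (PySem.List.index? (xs.drop start) v).map (· + start)

-- the try/while loop of A: fuel makes the recursion total (index strictly increases, bounded by length)
def pvALoop (main_list : List String) (sublist : List String) (v : String) :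
    Nat → Nat → List Int → List Int
  | 0, _, acc => acc
  | fuel+1, index, acc =>
    if (index : Int) ≤ (main_list.length : Int) - (sublist.length : Int) then
      let acc' :=
        if PySem.List.slice main_list (some (index : Int))
            (some ((index : Int) + (sublist.length : Int))) = sublist then
          acc ++ [(index : Int)]
        else acc
      match pvAFindFrom main_list v (index + 1) with
      | none => acc'                        -- ValueError: except → return
      | some j => pvALoop main_list sublist v fuel j acc'
    else acc

def find_start_indices_py (main_list : List String) (sublist : List String) : List Int :=
  match sublist.head? with
  | none => []                              -- Python raises IndexError here (sublist[0]); excluded by Pre_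
  | some v =>
    match PySem.List.index? main_list v with
    | none => []                            -- ValueError on the first index(): except → []
    | some i => pvALoop main_list sublist v (main_list.length + 1) i []

-- ===== PORT B =====
def find_start_indices_py_alt (main_list : List String) (sublist : List String) : List Int :=
  let k : Int := (sublist.length : Int)
  (PySem.List.pyRange 0 ((main_list.length : Int) - k + 1) 1).filter
    (fun i => PySem.List.slice main_list (some i) (some (i + k)) == sublist)

-- ===== PRECONDITION & SPEC =====
-- Pre_ excludes only sublist = [], where A raises IndexError on sublist[0].
def Pre_find_start_indices_py (main_list : List String) (sublist : List String) : Prop :=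
  sublist ≠ []
instance (main_list : List String) (sublist : List String) : Decidable (Pre_find_start_indices_py main_list sublist) := by unfold Pre_find_start_indices_py; infer_instance

def pvWitness_find_start_indices_py : List String × List String := (["a", "b", "a", "b"], ["a", "b"])

-- On an empty sublist A raises IndexError (sublist[0]); B returns every index 0..len(main_list).
def Raises_find_start_indices_py (main_list : List String) (sublist : List String) : Prop :=
  sublist = []
instance (main_list : List String) (sublist : List String) : Decidable (Raises_find_start_indices_py main_list sublist) := by unfold Raises_find_start_indices_py; infer_instance
def pvRaiseWitness_find_start_indices_py : List String × List String := (["a"], [])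
def pvRaiseWitnessOut_find_start_indices_py : List Int := [0, 1]

def Spec_find_start_indices_py (main_list : List String) (sublist : List String) (out : List Int) : Prop := out = find_start_indices_py_alt main_list sublist
instance (main_list : List String) (sublist : List String) (out : List Int) : Decidable (Spec_find_start_indices_py main_list sublist out) := by unfold Spec_find_start_indices_py; infer_instance

-- ===== CLAIM (what is proved, stated in full; the proofs are below) =====
def Claim_equal_find_start_indices_py : Prop := ∀ (main_list : List String) (sublist : List String), Dom_find_start_indices_py main_list sublist → Pre_find_start_indices_py main_list sublist → Spec_find_start_indices_py main_list sublist (find_start_indices_py main_list sublist)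

def Claim_raises_find_start_indices_py : Prop := (∀ (main_list : List String) (sublist : List String), Dom_find_start_indices_py main_list sublist → Raises_find_start_indices_py main_list sublist → ¬ Pre_find_start_indices_py main_list sublist) ∧ (Dom_find_start_indices_py (pvRaiseWitness_find_start_indices_py.1) (pvRaiseWitness_find_start_indices_py.2) ∧ Raises_find_start_indices_py (pvRaiseWitness_find_start_indices_py.1) (pvRaiseWitness_find_start_indices_py.2) ∧ find_start_indices_py_alt (pvRaiseWitness_find_start_indices_py.1) (pvRaiseWitness_find_start_indices_py.2) = pvRaiseWitnessOut_find_start_indices_py)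

-- ===== LEMMAS AND PROOFS =====

-- canonical list of match positions from index i upward
def pvMatches (main : List String) (sub : List String) (i : Nat) : List Int :=
  if i + sub.length ≤ main.length then
    (if (main.drop i).take sub.length = sub then [(i : Int)] else []) ++ pvMatches main sub (i+1)
  else []
termination_by main.length + 1 - i
decreasing_by omega

-- ---- B side ----
theorem pvB_gen (main sub : List String) :
    ∀ (c i : Nat), main.length + 1 - i ≤ c →
      (PySem.List.pyRange (i : Int) ((main.length : Int) - (sub.length : Int) + 1) 1).filter
        (fun j => PySem.List.slice main (some j) (some (j + (sub.length : Int))) == sub)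
      = pvMatches main sub i := by
  intro c
  induction c with
  | zero =>
      intro i hi
      rw [PySem.List.pyRange_one_eq_nil (by omega), pvMatches, if_neg (by omega)]
      rfl
  | succ c ih =>
      intro i hi
      by_cases hle : i + sub.length ≤ main.length
      · rw [PySem.List.pyRange_one_cons (by omega), List.filter_cons, pvMatches,
          if_pos hle]
        have hslice : PySem.List.slice main (some (i : Int))
            (some ((i : Int) + (sub.length : Int))) = (main.drop i).take sub.length :=
          PySem.List.slice_natCast_add main i sub.length
        have htail : ((i : Int) + 1) = (((i + 1 : Nat)) : Int) := by push_cast; ring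
        rw [htail, ih (i+1) (by omega)]
        by_cases hm : (main.drop i).take sub.length = sub
        · simp [hslice, hm]
        · simp [hslice, hm]
      · rw [PySem.List.pyRange_one_eq_nil (by omega), pvMatches, if_neg (by omega)]
        rfl

theorem pvB_eq_matches (main sub : List String) :
    find_start_indices_py_alt main sub = pvMatches main sub 0 := by
  have := pvB_gen main sub (main.length + 1) 0 (by omega)
  simpa [find_start_indices_py_alt] using this

-- ---- A side ----
-- a slice match at i forces main[i] = sub's first element
theorem pv_head_of_take (main : List String) (v : String) (rest : List String) (i : Nat)
    (heq : (main.drop i).take (v :: rest).length = v :: rest) : main[i]? = some v := by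
  have h0 : ((main.drop i).take (v :: rest).length)[0]? = some v := by rw [heq]; rfl
  rw [List.getElem?_take, if_pos (by simp)] at h0
  rw [← List.head?_eq_getElem?, List.head?_drop] at h0
  exact h0

-- step: no first-element occurrence at i → position i contributes nothing
theorem pvMatches_step (main : List String) (v : String) (rest : List String) (i : Nat)
    (hne : main[i]? ≠ some v) :
    pvMatches main (v :: rest) i = pvMatches main (v :: rest) (i+1) := by
  by_cases hle : i + (v :: rest).length ≤ main.length
  · rw [pvMatches, if_pos hle, if_neg (fun h => hne (pv_head_of_take main v rest i h)),
      List.nil_append]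
  · rw [pvMatches, if_neg hle, pvMatches, if_neg (by omega)]

theorem pvMatches_skip (main : List String) (v : String) (rest : List String) (i m : Nat)
    (him : i ≤ m) (hno : ∀ j, i ≤ j → j < m → main[j]? ≠ some v) :
    pvMatches main (v :: rest) i = pvMatches main (v :: rest) m := by
  induction m, him using Nat.le_induction with
  | base => rfl
  | succ m him ih =>
      rw [ih (fun j h1 h2 => hno j h1 (by omega)),
        pvMatches_step main v rest m (hno m him (by omega))]

theorem pvMatches_nil (main : List String) (v : String) (rest : List String) :
    ∀ (c i : Nat), main.length + 1 - i ≤ c → (∀ j, i ≤ j → main[j]? ≠ some v) →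
      pvMatches main (v :: rest) i = [] := by
  intro c
  induction c with
  | zero => intro i hi _; rw [pvMatches, if_neg (by simp; omega)]
  | succ c ih =>
      intro i hi hno
      by_cases hle : i + (v :: rest).length ≤ main.length
      · rw [pvMatches_step main v rest i (hno i le_rfl)]
        exact ih (i+1) (by omega) (fun j h1 => hno j (by omega))
      · rw [pvMatches, if_neg hle]

-- list.index(v, s) facts
theorem pvAFindFrom_some (main : List String) (v : String) (s j : Nat)
    (h : pvAFindFrom main v s = some j) :
    s ≤ j ∧ j < main.length ∧ main[j]? = some v ∧
      ∀ m, s ≤ m → m < j → main[m]? ≠ some v := by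
  unfold pvAFindFrom at h
  cases ht : PySem.List.index? (main.drop s) v with
  | none => rw [ht] at h; simp at h
  | some t =>
      rw [ht] at h
      simp only [Option.map_some, Option.some.injEq] at h
      obtain ⟨hk, hv, hprev⟩ := PySem.List.getElem_of_index?_eq_some ht
      have hlen : t + s < main.length := by
        have := hk; rw [List.length_drop] at this; omega
      have hj : main[j]? = some v := by
        have h1 : (main.drop s)[t]? = some v := by
          rw [List.getElem?_eq_getElem hk]; exact congrArg some hv
        rw [List.getElem?_drop] at h1
        rw [show j = s + t by omega]; exact h1
      refine ⟨by omega, by omega, hj, ?_⟩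
      intro m h1 h2 hm
      have h3 : (main.drop s)[m - s]? = some v := by
        rw [List.getElem?_drop, show s + (m - s) = m by omega]; exact hm
      have h4 : m - s < (main.drop s).length := (List.getElem?_eq_some_iff.mp h3).1
      exact hprev (m - s) (by omega)
        (Option.some.inj ((List.getElem?_eq_getElem h4).symm.trans h3))

theorem pvAFindFrom_none (main : List String) (v : String) (s : Nat)
    (h : pvAFindFrom main v s = none) :
    ∀ j, s ≤ j → main[j]? ≠ some v := by
  unfold pvAFindFrom at h
  cases ht : PySem.List.index? (main.drop s) v with
  | some t => rw [ht] at h; simp at h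
  | none =>
      have hnm : v ∉ main.drop s := (PySem.List.index?_eq_none_iff _ _).mp ht
      intro j hj hjv
      apply hnm
      have h3 : (main.drop s)[j - s]? = some v := by
        rw [List.getElem?_drop, show s + (j - s) = j by omega]; exact hjv
      exact List.mem_of_getElem? h3

theorem pvALoop_eq (main : List String) (v : String) (rest : List String) :
    ∀ (fuel i : Nat) (acc : List Int), main.length + 1 - i ≤ fuel →
      pvALoop main (v :: rest) v fuel i acc = acc ++ pvMatches main (v :: rest) i := by
  intro fuel
  induction fuel with
  | zero =>
      intro i acc hi
      rw [pvALoop, pvMatches, if_neg (by simp; omega), List.append_nil]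
  | succ fuel ih =>
      intro i acc hi
      rw [pvALoop]
      by_cases hc : (i : Int) ≤ (main.length : Int) - ((v :: rest).length : Int)
      · rw [if_pos hc]
        have hle : i + (v :: rest).length ≤ main.length := by
          have h2 := hc; push_cast at h2; omega
        have hslice := PySem.List.slice_natCast_add main i (v :: rest).length
        rw [pvMatches, if_pos hle]
        cases hf : pvAFindFrom main v (i + 1) with
        | none =>
            dsimp only
            have hnil : pvMatches main (v :: rest) (i+1) = [] :=
              pvMatches_nil main v rest (main.length + 1 - (i+1)) (i+1) le_rfl
                (pvAFindFrom_none main v (i+1) hf)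
            rw [hnil, hslice]
            by_cases hm : (main.drop i).take (v :: rest).length = v :: rest
            · rw [if_pos hm, if_pos hm]; simp
            · rw [if_neg hm, if_neg hm]; simp
        | some j =>
            dsimp only
            obtain ⟨hij, hjlen, _, hno⟩ := pvAFindFrom_some main v (i+1) j hf
            rw [hslice, pvMatches_skip main v rest (i+1) j hij hno]
            by_cases hm : (main.drop i).take (v :: rest).length = v :: rest
            · rw [if_pos hm, if_pos hm, ih j (acc ++ [(i : Int)]) (by omega)]; simp
            · rw [if_neg hm, if_neg hm, ih j acc (by omega)]; simp
      · rw [if_neg hc]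
        have hgt : ¬ (i + (v :: rest).length ≤ main.length) := by
          push_cast at hc; omega
        rw [pvMatches, if_neg hgt, List.append_nil]

theorem pvA_eq_matches (main sub : List String) (h : sub ≠ []) :
    find_start_indices_py main sub = pvMatches main sub 0 := by
  obtain ⟨v, rest, rfl⟩ : ∃ v rest, sub = v :: rest := by
    cases sub with
    | nil => exact absurd rfl h
    | cons a b => exact ⟨a, b, rfl⟩
  unfold find_start_indices_py
  simp only [List.head?_cons]
  cases hidx : PySem.List.index? main v with
  | none =>
      have hnm : v ∉ main := (PySem.List.index?_eq_none_iff _ _).mp hidx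
      rw [pvMatches_nil main v rest (main.length + 1) 0 (by omega)]
      intro j _ hj
      exact hnm (List.mem_of_getElem? hj)
  | some i =>
      dsimp only
      obtain ⟨hk, hv, hprev⟩ := PySem.List.getElem_of_index?_eq_some hidx
      rw [pvALoop_eq main v rest (main.length + 1) i [] (by omega), List.nil_append]
      rw [pvMatches_skip main v rest 0 i (by omega)]
      intro j _ hj hjv
      exact hprev j hj (Option.some.inj ((List.getElem?_eq_getElem (by omega)).symm.trans hjv))

-- ===== VERDICT (by name: the statement is the Claim_ definition above) =====
theorem find_start_indices_py_spec : Claim_equal_find_start_indices_py := by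
  intro main sub _ hpre
  unfold Spec_find_start_indices_py
  rw [pvA_eq_matches main sub hpre, pvB_eq_matches]

def find_start_indices_py_raises : Claim_raises_find_start_indices_py := by
  unfold Claim_raises_find_start_indices_py
  exact ⟨fun _ _ _ hr => by simp [Pre_find_start_indices_py, Raises_find_start_indices_py] at *; exact hr, by decide⟩
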